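-- pv_equiv track=rewrite | github.com/ArkansasIo/universe-empire-domions | script/ogamex_mass_rewrite.py | normalize_php_type
-- ===== SOURCE A (Python) =====
-- PHP_TYPE_MAP = {
--     "int": "number",
--     "float": "number",
--     "string": "string",
--     "bool": "boolean",
--     "boolean": "boolean",
--     "array": "unknown[]",
--     "mixed": "unknown",
--     "void": "void",
--     "object": "Record<string, unknown>",
--     "callable": "(...args: unknown[]) => unknown",
-- }
--
-- def normalize_php_type(raw_type: str | None) -> str:
--     if not raw_type:
--         return "unknown"
--
--     cleaned = raw_type.strip().lstrip("?")
--     if "|" in cleaned: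
--       parts = [normalize_php_type(part) for part in cleaned.split("|")]
--       unique = []
--       for part in parts:
--           if part not in unique:
--               unique.append(part)
--       return " | ".join(unique)
--
--     if cleaned in PHP_TYPE_MAP:
--         return PHP_TYPE_MAP[cleaned]
--
--     if cleaned.endswith("[]"):
--         inner = normalize_php_type(cleaned[:-2])
--         return f"{inner}[]"
--
--     short_name = cleaned.split("\\")[-1]
--     return short_name if short_name else "unknown"
-- ===== SOURCE B (Python) =====
-- PHP_TYPE_MAP = {
--     "int": "number",
--     "float": "number",
--     "string": "string",
--     "bool": "boolean",
--     "boolean": "boolean",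
--     "array": "unknown[]",
--     "mixed": "unknown",
--     "void": "void",
--     "object": "Record<string, unknown>",
--     "callable": "(...args: unknown[]) => unknown",
-- }
--
--
-- def _resolve(cleaned):
--     # iterative: peel trailing bracket pairs (re-cleaning between levels), then map the base
--     depth = 0
--     while True:
--         hit = PHP_TYPE_MAP.get(cleaned)
--         if hit is not None:
--             base = hit
--             break
--         if cleaned.endswith("[]"):
--             cleaned = cleaned[:-2].strip().lstrip("?")
--             depth += 1
--             continue
--         last = cleaned.split("\\")[-1]
--         base = last if last else "unknown"
--         break
--     return base + "[]" * depth
--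
--
-- def normalize_php_type(raw_type):
--     if not raw_type:
--         return "unknown"
--     cleaned = raw_type.strip().lstrip("?")
--     if "|" not in cleaned:
--         return _resolve(cleaned)
--     uniq = []
--     for part in cleaned.split("|"):
--         t = _resolve(part.strip().lstrip("?"))
--         if t not in uniq:
--             uniq.append(t)
--     return " | ".join(uniq)
-- ===== Notes on version B (the rewrite author's own statement) =====
-- stated objective: alternative
-- what changed: Replaces A's self-recursion (recursing per union part and per trailing bracket-pair level) with a flat iterative pass: one while-loop that peels trailing bracket pairs while counting depth, then a single base lookup, with union parts handled by one dedup loop.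
import Mathlib
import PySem

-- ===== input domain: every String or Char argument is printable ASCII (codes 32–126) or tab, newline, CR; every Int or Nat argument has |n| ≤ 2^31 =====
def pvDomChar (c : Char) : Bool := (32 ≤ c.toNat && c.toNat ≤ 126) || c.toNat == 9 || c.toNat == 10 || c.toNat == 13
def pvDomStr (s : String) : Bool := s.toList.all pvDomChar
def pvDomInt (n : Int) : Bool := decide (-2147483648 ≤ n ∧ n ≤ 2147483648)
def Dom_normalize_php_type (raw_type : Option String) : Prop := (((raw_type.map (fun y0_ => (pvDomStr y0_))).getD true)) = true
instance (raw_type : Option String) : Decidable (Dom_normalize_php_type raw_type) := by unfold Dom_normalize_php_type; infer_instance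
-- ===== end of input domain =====

-- B replaces A's self-recursion (per union part and per trailing bracket-pair level) by a flat
-- iterative pass: a while-loop peeling bracket pairs with a depth counter, then one base lookup.

-- shared module constant PHP_TYPE_MAP (a Python dict literal, distinct keys)
def phpTypeMap : PySem.Dict (List Char) (List Char) := PySem.Dict.mk [
  ("int".toList, "number".toList),
  ("float".toList, "number".toList),
  ("string".toList, "string".toList),
  ("bool".toList, "boolean".toList),
  ("boolean".toList, "boolean".toList),
  ("array".toList, "unknown[]".toList),
  ("mixed".toList, "unknown".toList),
  ("void".toList, "void".toList),
  ("object".toList, "Record<string, unknown>".toList),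
  ("callable".toList, "(...args: unknown[]) => unknown".toList)]

-- s.strip().lstrip("?") — lstrip("?") drops exactly the leading '?' characters (exact hand port)
def phpClean (s : List Char) : List Char :=
  (PySem.Chars.strip s).dropWhile (fun c => c == '?')

-- ===== PORT A =====
-- A's recursion, on the code points; fuel only makes the recursion structural
-- (fuel = length + 1 always suffices, each recursive call is on a strictly shorter string)
def normGoA : Nat → List Char → List Char
  | 0, _ => []
  | fuel+1, raw =>
    if raw = [] then "unknown".toList
    else
      if PySem.Chars.isIn "|".toList (phpClean raw) then
        PySem.Chars.join " | ".toList
          ((((PySem.Chars.splitOn (phpClean raw) "|".toList).map (fun p => normGoA fuel p)).foldl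
            (fun u p => if p ∈ u then u else u ++ [p]) []))
      else
        match phpTypeMap.get? (phpClean raw) with
        | some v => v
        | none =>
          if PySem.Chars.endswith (phpClean raw) "[]".toList then
            normGoA fuel (PySem.Chars.slice (phpClean raw) none (some (-2))) ++ "[]".toList
          else
            if (PySem.List.pyGet? (PySem.Chars.splitOn (phpClean raw) "\\".toList) (-1)).getD [] = []
            then "unknown".toList
            else (PySem.List.pyGet? (PySem.Chars.splitOn (phpClean raw) "\\".toList) (-1)).getD []

def normalize_php_type (raw_type : Option String) : String :=
  match raw_type with
  | none => "unknown"
  | some s => String.ofList (normGoA (s.toList.length + 1) s.toList)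

-- ===== PORT B =====
-- the bracket suffix repeated depth times (Python string repetition, exact hand port)
def brackets (depth : Nat) : List Char := (List.replicate depth "[]".toList).flatten

-- the while-loop of _resolve; fuel = length + 1 suffices (each iteration removes ≥ 2 chars)
def resolveGo : Nat → List Char → Nat → List Char
  | 0, _, depth => brackets depth
  | fuel+1, cleaned, depth =>
    match phpTypeMap.get? cleaned with
    | some hit => hit ++ brackets depth
    | none =>
      if PySem.Chars.endswith cleaned "[]".toList then
        resolveGo fuel (phpClean (PySem.Chars.slice cleaned none (some (-2)))) (depth+1)
      else
        (if (PySem.List.pyGet? (PySem.Chars.splitOn cleaned "\\".toList) (-1)).getD [] = []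
         then "unknown".toList
         else (PySem.List.pyGet? (PySem.Chars.splitOn cleaned "\\".toList) (-1)).getD []) ++ brackets depth

def resolveB (cleaned : List Char) : List Char := resolveGo (cleaned.length + 1) cleaned 0

def normalize_php_type_alt (raw_type : Option String) : String :=
  match raw_type with
  | none => "unknown"
  | some s =>
    if s.toList = [] then "unknown"
    else
      if PySem.Chars.isIn "|".toList (phpClean s.toList) = false then
        String.ofList (resolveB (phpClean s.toList))
      else
        String.ofList (PySem.Chars.join " | ".toList
          ((PySem.Chars.splitOn (phpClean s.toList) "|".toList).foldl
            (fun u p => if resolveB (phpClean p) ∈ u then u else u ++ [resolveB (phpClean p)]) []))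

-- ===== PRECONDITION & SPEC =====
def Spec_normalize_php_type (raw_type : Option String) (out : String) : Prop := out = normalize_php_type_alt raw_type
instance (raw_type : Option String) (out : String) : Decidable (Spec_normalize_php_type raw_type out) := by unfold Spec_normalize_php_type; infer_instance

-- ===== CLAIM (what is proved, stated in full; the proofs are below) =====
def Claim_equal_normalize_php_type : Prop := ∀ (raw_type : Option String), Dom_normalize_php_type raw_type → Spec_normalize_php_type raw_type (normalize_php_type raw_type)

-- ===== LEMMAS AND PROOFS =====

theorem phpClean_sublist (s : List Char) : (phpClean s).Sublist s := by
  unfold phpClean PySem.Chars.strip PySem.Chars.lstrip PySem.Chars.rstrip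
  refine ((List.dropWhile_sublist _).trans ?_)
  have h1 : ((List.dropWhile PySem.Chars.isspace (List.dropWhile PySem.Chars.isspace s).reverse).reverse).Sublist (List.dropWhile PySem.Chars.isspace s) := by
    have := (List.dropWhile_sublist (l := (List.dropWhile PySem.Chars.isspace s).reverse) PySem.Chars.isspace).reverse
    simpa using this
  exact h1.trans (List.dropWhile_sublist _)

theorem phpClean_length_le (s : List Char) : (phpClean s).length ≤ s.length :=
  (phpClean_sublist s).length_le

theorem mem_of_mem_phpClean {c : Char} {s : List Char} (h : c ∈ phpClean s) : c ∈ s :=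
  (phpClean_sublist s).subset h

theorem mem_dropWhile_of_mem (p : Char → Bool) {c : Char} {l : List Char}
    (h : c ∈ l) (hc : p c = false) : c ∈ List.dropWhile p l := by
  have hsplit : l = List.takeWhile p l ++ List.dropWhile p l := (List.takeWhile_append_dropWhile).symm
  rcases List.mem_append.mp (hsplit ▸ h) with h1 | h1
  · exact absurd (List.mem_takeWhile_imp h1) (by simp [hc])
  · exact h1

theorem mem_phpClean_of_mem {c : Char} {s : List Char}
    (h : c ∈ s) (hsp : PySem.Chars.isspace c = false) (hq : (c == '?') = false) :
    c ∈ phpClean s := by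
  unfold phpClean PySem.Chars.strip PySem.Chars.lstrip PySem.Chars.rstrip
  have h1 : c ∈ List.dropWhile PySem.Chars.isspace s := mem_dropWhile_of_mem _ h hsp
  have h2 : c ∈ List.dropWhile PySem.Chars.isspace (List.dropWhile PySem.Chars.isspace s).reverse :=
    mem_dropWhile_of_mem _ (by simpa using h1) hsp
  exact mem_dropWhile_of_mem (fun c => c == '?') (by simpa using h2) hq

theorem isIn_singleton_iff (c : Char) (l : List Char) :
    PySem.Chars.isIn [c] l = true ↔ c ∈ l := by
  rw [PySem.Chars.isIn_iff_infix]
  constructor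
  · intro h; exact List.singleton_sublist.mp h.sublist
  · intro h
    rcases List.append_of_mem h with ⟨u, v, rfl⟩
    exact ⟨u, v, by simp⟩

theorem splitOn_go_spec (c : Char) : ∀ (fuel : Nat) (l cur : List Char) (acc : List (List Char)),
    l.length < fuel → c ∉ cur →
    ∀ p ∈ PySem.Chars.splitOn.go [c] fuel l cur acc,
      p ∈ acc ∨ (c ∉ p ∧ p.length + (if c ∈ l then 1 else 0) ≤ cur.length + l.length) := by
  intro fuel
  induction fuel with
  | zero => intro l cur acc h; exact absurd h (Nat.not_lt_zero _)
  | succ fuel ih =>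
    intro l cur acc hf hc p hp
    match l with
    | [] =>
      simp only [PySem.Chars.splitOn.go] at hp
      rw [List.mem_reverse, List.mem_cons] at hp
      rcases hp with rfl | hp
      · right; constructor
        · simpa using hc
        · simp
      · left; exact hp
    | a :: rest =>
      simp only [PySem.Chars.splitOn.go] at hp
      by_cases hpre : [c].isPrefixOf (a :: rest) = true
      · have ha : c = a := by
          simp [List.isPrefixOf] at hpre; exact hpre
        rw [if_pos hpre] at hp
        have hdrop : List.drop [c].length (a :: rest) = rest := by simp
        rw [hdrop] at hp
        have := ih rest [] (cur.reverse :: acc) (by simp at hf ⊢; omega) (by simp) p hp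
        rcases this with hmem | ⟨hcp, hlen⟩
        · rw [List.mem_cons] at hmem
          rcases hmem with rfl | hm
          · right
            refine ⟨by simpa using hc, ?_⟩
            simp
            split_ifs <;> omega
          · left; exact hm
        · right; refine ⟨hcp, ?_⟩
          subst ha
          have h1 : p.length ≤ rest.length := by
            split_ifs at hlen <;> simp at hlen <;> omega
          simp
          omega
      · rw [if_neg hpre] at hp
        have hne : c ≠ a := by
          intro h; apply hpre; subst h; simp [List.isPrefixOf]
        have := ih rest (a :: cur) acc (by simp at hf ⊢; omega) (by simp only [List.mem_cons, not_or]; exact ⟨hne, hc⟩) p hp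
        rcases this with hmem | ⟨hcp, hlen⟩
        · left; exact hmem
        · right; refine ⟨hcp, ?_⟩
          have hiff : (c ∈ a :: rest) ↔ (c ∈ rest) := by simp [hne]
          simp only [hiff, List.length_cons] at hlen ⊢
          split_ifs at hlen ⊢ <;> simp at hlen ⊢ <;> omega

theorem splitOn_spec (c : Char) (s : List Char) :
    ∀ p ∈ PySem.Chars.splitOn s [c],
      c ∉ p ∧ p.length + (if c ∈ s then 1 else 0) ≤ s.length := by
  intro p hp
  have := splitOn_go_spec c (s.length + 1) s [] [] (by omega) (by simp) p
    (by simpa [PySem.Chars.splitOn] using hp)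
  rcases this with h | h
  · simp at h
  · simpa using h

theorem brackets_succ (d : Nat) : brackets (d + 1) = "[]".toList ++ brackets d := by
  simp [brackets, List.replicate_succ]

theorem endswith_brackets {s : List Char} (h : PySem.Chars.endswith s "[]".toList = true) :
    ∃ t, s = t ++ "[]".toList := by
  unfold PySem.Chars.endswith at h
  rcases List.isSuffixOf_iff_suffix.mp h with ⟨t, ht⟩
  exact ⟨t, ht.symm⟩

theorem slice_drop_two (t : List Char) :
    PySem.Chars.slice (t ++ "[]".toList) none (some (-2)) = t := by
  simp only [PySem.Chars.slice_eq_listSlice]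
  simp [PySem.List.slice, PySem.List.clampIdx]

-- the central induction: A's recursion (with ≥ len+1 fuel) equals B's depth-counting loop
theorem key_lemma : ∀ (fa : Nat), ∀ (raw : List Char) (depth fb : Nat),
    raw.length < fa → (phpClean raw).length < fb → '|' ∉ raw →
    normGoA fa raw ++ brackets depth = resolveGo fb (phpClean raw) depth := by
  intro fa
  induction fa with
  | zero => intro raw depth fb h; omega
  | succ fa ih =>
    intro raw depth fb hfa hfb hbar
    obtain ⟨fb', rfl⟩ : ∃ fb', fb = fb' + 1 := ⟨fb - 1, by omega⟩
    by_cases hraw : raw = []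
    · subst hraw
      simp only [normGoA]
      have hclean : phpClean ([] : List Char) = [] := by decide
      rw [hclean]
      simp only [resolveGo]
      have hm : phpTypeMap.get? ([] : List Char) = none := by decide
      rw [hm]
      have he : PySem.Chars.endswith ([] : List Char) "[]".toList = false := by decide
      rw [he]
      simp only [Bool.false_eq_true, if_false]
      have : (PySem.List.pyGet? (PySem.Chars.splitOn ([] : List Char) "\\".toList) (-1)).getD [] = ([] : List Char) := by decide
      rw [this]
      simp
    · have hbc : '|' ∉ phpClean raw := fun h => hbar (mem_of_mem_phpClean h)
      have hisin : PySem.Chars.isIn "|".toList (phpClean raw) = false := by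
        have : ¬ PySem.Chars.isIn ['|'] (phpClean raw) = true := fun h => hbc ((isIn_singleton_iff _ _).mp h)
        simpa using this
      simp only [normGoA, if_neg hraw, hisin, Bool.false_eq_true, if_false]
      simp only [resolveGo]
      cases hm : phpTypeMap.get? (phpClean raw) with
      | some v => rfl
      | none =>
        cases he : PySem.Chars.endswith (phpClean raw) "[]".toList with
        | true =>
          simp only []
          rcases endswith_brackets he with ⟨t, ht⟩
          rw [ht, slice_drop_two]
          have hlen : (phpClean raw).length ≤ raw.length := phpClean_length_le raw
          have htlen : t.length + 2 = (phpClean raw).length := by rw [ht]; simp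
          have hbt : '|' ∉ t := by
            intro h; exact hbc (by rw [ht]; exact List.mem_append.mpr (Or.inl h))
          have := ih t (depth + 1) fb' (by omega)
            (by have := phpClean_length_le t; omega) hbt
          rw [← this, brackets_succ]
          simp
        | false =>
          simp only [Bool.false_eq_true, if_false]

-- dedup-fold of the mapped list (A) equals the single dedup loop (B) once the per-part values agree
theorem union_fold_eq (parts : List (List Char)) (f g : List Char → List Char)
    (h : ∀ p ∈ parts, f p = g p) :
    (parts.map f).foldl (fun u p => if p ∈ u then u else u ++ [p]) [] =
    parts.foldl (fun u p => if g p ∈ u then u else u ++ [g p]) [] := by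
  rw [List.foldl_map]
  exact PySem.List.foldl_congr_mem parts _ _ []
    (fun acc p hp => by simp only [h p hp])

-- ===== VERDICT (by name: the statement is the Claim_ definition above) =====
theorem normalize_php_type_spec : Claim_equal_normalize_php_type := by
  intro raw_type _hdom
  unfold Spec_normalize_php_type
  cases raw_type with
  | none => rfl
  | some s =>
    simp only [normalize_php_type, normalize_php_type_alt]
    by_cases hs : s.toList = []
    · rw [if_pos hs, hs]
      decide
    · rw [if_neg hs]
      cases hisin : PySem.Chars.isIn "|".toList (phpClean s.toList) with
      | false =>
        have hbar : '|' ∉ s.toList := by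
          intro h
          have : '|' ∈ phpClean s.toList := mem_phpClean_of_mem h (by decide) (by decide)
          have := (isIn_singleton_iff '|' (phpClean s.toList)).mpr this
          simp [this] at hisin
        have := key_lemma (s.toList.length + 1) s.toList 0 ((phpClean s.toList).length + 1)
          (by omega) (by omega) hbar
        unfold resolveB
        rw [← this]
        simp [brackets]
      | true =>
        simp only [Bool.true_eq_false, if_false]
        have hmem : '|' ∈ phpClean s.toList := (isIn_singleton_iff '|' (phpClean s.toList)).mp (by simpa using hisin)
        obtain ⟨fa, hfa⟩ : ∃ fa, s.toList.length + 1 = fa + 1 := ⟨s.toList.length, rfl⟩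
        rw [hfa]
        simp only [normGoA, if_neg hs]
        congr 1
        rw [if_pos hisin]
        apply congrArg
        apply union_fold_eq
        intro p hp
        have hspec := splitOn_spec '|' (phpClean s.toList) p (by simpa using hp)
        rw [if_pos hmem] at hspec
        have hlenp : p.length + 1 ≤ (phpClean s.toList).length := hspec.2
        have hclean_le : (phpClean s.toList).length ≤ s.toList.length := phpClean_length_le s.toList
        have := key_lemma fa p 0 ((phpClean p).length + 1) (by omega) (by omega) hspec.1
        unfold resolveB
        rw [← this]
        simp [brackets]
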